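-- pv_equiv track=rewrite | github.com/L-Mictlan/POO-Practicas | Prácticas/Practica_19/Py 19/BURBUJA (Ordenamiento indirecto).py | burbuja_indirecta
-- ===== SOURCE A (Python) =====
-- def burbuja_indirecta(lista):
--     n = len(lista)
--     indices = list(range(n))
--
--     for i in range(n):
--         for j in range(0, n - i - 1):
--             if lista[indices[j]] > lista[indices[j + 1]]:
--                 indices[j], indices[j + 1] = indices[j + 1], indices[j]
--
--     return indices
-- ===== SOURCE B (Python) =====
-- def burbuja_indirecta(lista):
--     # stable argsort via the built-in sort; (value, index) key reproduces
--     # bubble sort's stable order exactly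
--     return sorted(range(len(lista)), key=lambda i: (lista[i], i))
-- ===== Notes on version B (the rewrite author's own statement) =====
-- stated objective: faster
-- what changed: Replaces the quadratic adjacent-swap bubble passes over an index array with a single call to the built-in stable sort of range(n) keyed by (lista[i], i).
import Mathlib
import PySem

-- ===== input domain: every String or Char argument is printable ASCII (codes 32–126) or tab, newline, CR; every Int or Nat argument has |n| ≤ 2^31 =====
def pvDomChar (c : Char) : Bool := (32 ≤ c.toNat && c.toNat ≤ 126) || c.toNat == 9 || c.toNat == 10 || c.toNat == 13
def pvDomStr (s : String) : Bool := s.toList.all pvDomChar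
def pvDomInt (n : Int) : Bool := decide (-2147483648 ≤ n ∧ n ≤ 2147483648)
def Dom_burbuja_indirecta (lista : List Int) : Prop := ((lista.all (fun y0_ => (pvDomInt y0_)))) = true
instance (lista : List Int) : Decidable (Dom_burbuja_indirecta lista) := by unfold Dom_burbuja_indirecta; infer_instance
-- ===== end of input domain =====

-- B replaces A's quadratic bubble passes over the index array with one stable sort of
-- range(n) keyed by (lista[i], i) (same output; asymptotically faster algorithm).

-- ===== PORT A =====
-- one inner-loop body: compare lista[indices[j]] with lista[indices[j+1]] and swap.
-- j and both stored indices are always in range here, so the total pyGetD/pySetD forms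
-- are exact for Python's indexing/assignment.
def pvBubbleStep (lista : List Int) (s : List Int) (j : Int) : List Int :=
  let x := PySem.List.pyGetD s j 0
  let y := PySem.List.pyGetD s (j + 1) 0
  if PySem.List.pyGetD lista x 0 > PySem.List.pyGetD lista y 0 then
    PySem.List.pySetD (PySem.List.pySetD s j y) (j + 1) x
  else s

def burbuja_indirecta (lista : List Int) : List Int :=
  let n : Int := (lista.length : Int)
  let indices := PySem.List.pyRange 0 n
  (PySem.List.pyRange 0 n).foldl
    (fun s i => (PySem.List.pyRange 0 (n - i - 1)).foldl (pvBubbleStep lista) s)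
    indices

-- ===== PORT B =====
-- sorted(range(len(lista)), key=lambda i: (lista[i], i)); i is always a valid index,
-- so pyGetD is exact for lista[i]; the tuple key is Python's lexicographic pair = Lex (Int × Int).
def burbuja_indirecta_alt (lista : List Int) : List Int :=
  PySem.List.sorted (PySem.List.pyRange 0 (lista.length : Int))
    (fun i => toLex (PySem.List.pyGetD lista i 0, i)) false

-- ===== PRECONDITION & SPEC =====
def Spec_burbuja_indirecta (lista : List Int) (out : List Int) : Prop := out = burbuja_indirecta_alt lista
instance (lista : List Int) (out : List Int) : Decidable (Spec_burbuja_indirecta lista out) := by unfold Spec_burbuja_indirecta; infer_instance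

-- ===== CLAIM (what is proved, stated in full; the proofs are below) =====
def Claim_equal_burbuja_indirecta : Prop := ∀ (lista : List Int), Dom_burbuja_indirecta lista → Spec_burbuja_indirecta lista (burbuja_indirecta lista)

-- ===== LEMMAS AND PROOFS =====

-- the comparison key lista[i] and the full stable key (lista[i], i)
def pvK (lista : List Int) (i : Int) : Int := PySem.List.pyGetD lista i 0
def pvKey (lista : List Int) (i : Int) : Lex (Int × Int) := toLex (pvK lista i, i)
-- strict "comes before" order of the stable result
def pvLt (lista : List Int) (a b : Int) : Prop := pvKey lista a < pvKey lista b
-- equal-key entries stay in increasing index order (bubble never swaps them)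
def pvE (lista : List Int) (a b : Int) : Prop := pvK lista a = pvK lista b → a < b

-- structural form of one (truncated) bubble pass
def pvPass (lista : List Int) : List Int → List Int
  | [] => []
  | [a] => [a]
  | a :: b :: t =>
    if pvK lista a > pvK lista b then b :: pvPass lista (a :: t)
    else a :: pvPass lista (b :: t)
termination_by l => l.length

lemma pvPass_perm (lista : List Int) : ∀ l : List Int, (pvPass lista l).Perm l := by
  intro l
  induction l using pvPass.induct lista with
  | case1 => simp [pvPass]
  | case2 a => simp [pvPass]
  | case3 a b t h ih =>
    rw [pvPass, if_pos h]
    exact (ih.cons b).trans (List.Perm.swap a b t)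
  | case4 a b t h ih =>
    rw [pvPass, if_neg h]
    exact ih.cons a

lemma pvPass_maxEnd (lista : List Int) : ∀ l : List Int, l ≠ [] →
    ∃ w x, pvPass lista l = w ++ [x] ∧ ∀ y ∈ l, pvK lista y ≤ pvK lista x := by
  intro l
  induction l using pvPass.induct lista with
  | case1 => intro h; exact absurd rfl h
  | case2 a => exact fun _ => ⟨[], a, by simp [pvPass], by simp⟩
  | case3 a b t h ih =>
    intro _
    obtain ⟨w, x, hw, hx⟩ := ih (by simp)
    refine ⟨b :: w, x, by rw [pvPass, if_pos h, hw]; rfl, ?_⟩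
    intro y hy
    rcases List.mem_cons.mp hy with rfl | hy
    · exact hx y (by simp)
    · rcases List.mem_cons.mp hy with rfl | hy
      · exact le_of_lt (lt_of_lt_of_le h (hx a (by simp)))
      · exact hx y (by simp [hy])
  | case4 a b t h ih =>
    intro _
    obtain ⟨w, x, hw, hx⟩ := ih (by simp)
    refine ⟨a :: w, x, by rw [pvPass, if_neg h, hw]; rfl, ?_⟩
    intro y hy
    rcases List.mem_cons.mp hy with rfl | hy
    · exact le_trans (le_of_not_gt h) (hx b (by simp))
    · exact hx y hy

lemma pvPass_pairwiseE (lista : List Int) : ∀ l : List Int,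
    l.Pairwise (pvE lista) → (pvPass lista l).Pairwise (pvE lista) := by
  intro l
  induction l using pvPass.induct lista with
  | case1 => simp [pvPass]
  | case2 a => simp [pvPass]
  | case3 a b t h ih =>
    intro hp
    rw [pvPass, if_pos h]
    rcases hp with _ | ⟨ha, hp⟩
    rcases hp with _ | ⟨hb, hp⟩
    refine List.Pairwise.cons ?_ (ih (List.Pairwise.cons (fun y hy => ha y (by simp [hy])) hp))
    intro y hy
    rcases List.mem_cons.mp (((pvPass_perm lista (a :: t)).mem_iff).mp hy) with rfl | hy'
    · exact fun hk => absurd hk (ne_of_lt h)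
    · exact hb y hy'
  | case4 a b t h ih =>
    intro hp
    rw [pvPass, if_neg h]
    rcases hp with _ | ⟨ha, hp⟩
    refine List.Pairwise.cons ?_ (ih hp)
    intro y hy
    exact ha y (((pvPass_perm lista (b :: t)).mem_iff).mp hy)

lemma pvGetAppend (u r : List Int) (x d : Int) : (u ++ x :: r).getD u.length d = x := by
  induction u with
  | nil => simp [List.getD]
  | cons a u ih => simp

lemma pvSetAppend (u r : List Int) (x y : Int) : (u ++ x :: r).set u.length y = u ++ y :: r := by
  induction u with
  | nil => simp
  | cons a u ih => simp

-- the inner index loop over j = p, p+1, …, p+c-1 acting on u ++ w ++ v (|u| = p, |w| = c+1)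
-- is the structural pass on w
lemma pvSegFold (lista : List Int) (c : Nat) : ∀ (u w v : List Int), w.length = c + 1 →
    (List.range' u.length c).foldl (fun s (k : Nat) => pvBubbleStep lista s (k : Int)) (u ++ (w ++ v))
      = u ++ (pvPass lista w ++ v) := by
  induction c with
  | zero =>
    intro u w v hw
    obtain ⟨a, rfl⟩ := List.length_eq_one_iff.mp hw
    simp [pvPass]
  | succ c ih =>
    intro u w v hw
    cases w with
    | nil => simp at hw
    | cons a w' =>
    cases w' with
    | nil => simp at hw
    | cons b t =>
    have ht : t.length = c := by simpa using hw
    simp only [List.range'_succ, List.foldl_cons]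
    have hstate : u ++ ((a :: b :: t) ++ v) = u ++ a :: (b :: (t ++ v)) := by simp
    have hx : PySem.List.pyGetD (u ++ ((a :: b :: t) ++ v)) (u.length : Int) 0 = a := by
      rw [hstate, PySem.List.pyGetD_natCast, pvGetAppend]
    have hcast : (u.length : Int) + 1 = ((u.length + 1 : Nat) : Int) := by push_cast; ring
    have hsplit : u ++ ((a :: b :: t) ++ v) = (u ++ [a]) ++ b :: (t ++ v) := by simp
    have hl1 : u.length + 1 = (u ++ [a]).length := by simp
    have hy : PySem.List.pyGetD (u ++ ((a :: b :: t) ++ v)) ((u.length : Int) + 1) 0 = b := by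
      rw [hcast, PySem.List.pyGetD_natCast, hsplit, hl1, pvGetAppend]
    have hstep : pvBubbleStep lista (u ++ ((a :: b :: t) ++ v)) (u.length : Int)
        = u ++ ((if pvK lista a > pvK lista b then b :: a :: t else a :: b :: t) ++ v) := by
      simp only [pvBubbleStep, hx, hy, pvK]
      by_cases hab : PySem.List.pyGetD lista a 0 > PySem.List.pyGetD lista b 0
      · rw [if_pos hab, if_pos hab]
        have h1 : PySem.List.pySetD (u ++ ((a :: b :: t) ++ v)) (u.length : Int) b
            = (u ++ [b]) ++ b :: (t ++ v) := by
          rw [hstate, PySem.List.pySetD_natCast, pvSetAppend]; simp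
        rw [h1, hcast, PySem.List.pySetD_natCast]
        have hl2 : u.length + 1 = (u ++ [b]).length := by simp
        rw [hl2, pvSetAppend]; simp
      · rw [if_neg hab, if_neg hab]
    rw [hstep]
    by_cases hab : pvK lista a > pvK lista b
    · rw [if_pos hab]
      have hs : u ++ ((b :: a :: t) ++ v) = (u ++ [b]) ++ ((a :: t) ++ v) := by simp
      have hl2 : u.length + 1 = (u ++ [b]).length := by simp
      rw [hs, hl2, ih (u ++ [b]) (a :: t) v (by simp [ht])]
      rw [pvPass, if_pos hab]; simp
    · rw [if_neg hab]
      have hs : u ++ ((a :: b :: t) ++ v) = (u ++ [a]) ++ ((b :: t) ++ v) := by simp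
      rw [hs, hl1, ih (u ++ [a]) (b :: t) v (by simp [ht])]
      rw [pvPass, if_neg hab]; simp

-- loop invariant after i outer passes: unsorted prefix u of length n-i, sorted suffix v
def pvInv (lista : List Int) (i : Nat) (s : List Int) : Prop :=
  ∃ u v, s = u ++ v ∧ u.length = lista.length - i ∧
    s.Perm (PySem.List.pyRange 0 (lista.length : Int)) ∧
    s.Pairwise (pvE lista) ∧ v.Pairwise (pvLt lista) ∧
    ∀ a ∈ u, ∀ b ∈ v, pvLt lista a b

lemma pvLt_iff (lista : List Int) (a b : Int) :
    pvLt lista a b ↔ pvK lista a < pvK lista b ∨ (pvK lista a = pvK lista b ∧ a < b) := by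
  simp [pvLt, pvKey, Prod.Lex.toLex_lt_toLex]

lemma pvInner (lista : List Int) (i : Nat) (s : List Int) (hi : i < lista.length)
    (h : pvInv lista i s) :
    pvInv lista (i + 1)
      ((PySem.List.pyRange 0 ((lista.length : Int) - i - 1)).foldl (pvBubbleStep lista) s) := by
  obtain ⟨u, v, rfl, hul, hperm, hE, hvLt, hcross⟩ := h
  have hupos : 1 ≤ u.length := by omega
  have hc : (lista.length : Int) - i - 1 = ((u.length - 1 : Nat) : Int) := by omega
  rw [hc, PySem.List.pyRange_zero_natCast, List.foldl_map, List.range_eq_range']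
  have hseg := pvSegFold lista (u.length - 1) [] u v (by omega)
  simp only [List.nil_append, List.length_nil] at hseg
  rw [hseg]
  have hne : u ≠ [] := by intro h0; rw [h0] at hul; simp at hul; omega
  obtain ⟨w, x, hpass, hmax⟩ := pvPass_maxEnd lista u hne
  have hmemw : ∀ a ∈ w, a ∈ u := by
    intro a ha
    exact ((pvPass_perm lista u).mem_iff).mp (by rw [hpass]; exact List.mem_append_left _ ha)
  have hmemx : x ∈ u := ((pvPass_perm lista u).mem_iff).mp (by rw [hpass]; simp)
  have hEu := (List.pairwise_append.mp hE).1
  have hEpass : (pvPass lista u).Pairwise (pvE lista) := pvPass_pairwiseE lista u hEu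
  have hEwx : ∀ a ∈ w, pvE lista a x := by
    intro a ha
    rw [hpass] at hEpass
    exact (List.pairwise_append.mp hEpass).2.2 a ha x (by simp)
  refine ⟨w, x :: v, by rw [hpass]; simp, ?_, ?_, ?_, ?_, ?_⟩
  · have hlen : (pvPass lista u).length = u.length := (pvPass_perm lista u).length_eq
    rw [hpass] at hlen
    simp at hlen
    omega
  · exact ((pvPass_perm lista u).append_right v).trans hperm
  · rw [List.pairwise_append]
    refine ⟨hEpass, (List.pairwise_append.mp hE).2.1, ?_⟩
    intro a ha b hb
    exact (List.pairwise_append.mp hE).2.2 a (((pvPass_perm lista u).mem_iff).mp ha) b hb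
  · refine List.Pairwise.cons ?_ hvLt
    intro b hb
    exact hcross x hmemx b hb
  · intro a ha b hb
    rcases List.mem_cons.mp hb with rfl | hb
    · rcases lt_or_eq_of_le (hmax a (hmemw a ha)) with hlt | heq
      · exact (pvLt_iff lista a b).mpr (Or.inl hlt)
      · exact (pvLt_iff lista a b).mpr (Or.inr ⟨heq, hEwx a ha heq⟩)
    · exact hcross a (hmemw a ha) b hb

lemma pvOuter (lista : List Int) (c : Nat) : ∀ (j : Nat) (s : List Int),
    j + c = lista.length → pvInv lista j s →
    pvInv lista lista.length
      ((List.range' j c).foldl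
        (fun s (i : Nat) => (PySem.List.pyRange 0 ((lista.length : Int) - (i : Int) - 1)).foldl (pvBubbleStep lista) s) s) := by
  induction c with
  | zero =>
    intro j s hj h
    have : j = lista.length := by omega
    subst this
    simpa using h
  | succ c ihc =>
    intro j s hj h
    rw [List.range'_succ, List.foldl_cons]
    exact ihc (j + 1) _ (by omega) (pvInner lista j s (by omega) h)

-- ===== VERDICT (by name: the statement is the Claim_ definition above) =====
theorem burbuja_indirecta_spec : Claim_equal_burbuja_indirecta := by
  intro lista _
  unfold Spec_burbuja_indirecta
  have hR : PySem.List.pyRange 0 (lista.length : Int)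
      = List.map (fun (k : Nat) => (k : Int)) (List.range lista.length) :=
    PySem.List.pyRange_zero_natCast _
  have h0 : pvInv lista 0 (PySem.List.pyRange 0 (lista.length : Int)) := by
    refine ⟨PySem.List.pyRange 0 (lista.length : Int), [], by simp, ?_, by simp, ?_, by simp, by simp⟩
    · rw [hR]; simp
    · rw [hR]
      refine List.pairwise_map.mpr ?_
      exact List.pairwise_lt_range.imp (fun hab _ => by exact_mod_cast hab)
  have hfin := pvOuter lista lista.length 0 (PySem.List.pyRange 0 (lista.length : Int)) (by omega) h0
  have hbur : burbuja_indirecta lista =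
      (List.range' 0 lista.length).foldl
        (fun s (i : Nat) => (PySem.List.pyRange 0 ((lista.length : Int) - (i : Int) - 1)).foldl (pvBubbleStep lista) s)
        (List.map (fun (k : Nat) => (k : Int)) (List.range lista.length)) := by
    show (PySem.List.pyRange 0 (lista.length : Int)).foldl
        (fun s i => (PySem.List.pyRange 0 ((lista.length : Int) - i - 1)).foldl (pvBubbleStep lista) s)
        (PySem.List.pyRange 0 (lista.length : Int)) = _
    rw [hR, List.foldl_map, List.range_eq_range']
  rw [hR] at hfin
  obtain ⟨u, v, hs, hul, hperm, hE, hvlt, hcross⟩ := hfin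
  have hu : u = [] := List.eq_nil_of_length_eq_zero (by omega)
  subst hu
  simp only [List.nil_append] at hs
  rw [hbur, hs]
  rw [hs] at hperm
  refine (PySem.List.sorted_eq_of_perm_of_pairwise_lt _ v _ hperm ?_).symm
  exact hvlt.imp (fun h => by simpa [pvLt, pvKey, pvK] using h)
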